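-- pv_equiv track=rewrite | github.com/okara83/Becoming-a-Data-Scientist | Data Science and Machine Learning/Machine-Learning-In-Python-THOROUGH/EXAMPLES/EDABIT/EARLIER/28_strings_frets.py | string_fret
-- ===== SOURCE A (Python) =====
-- def string_fret(st, fr):
--
--     st_open = "EBGDAE"
--     strings = [1, 2, 3, 4, 5, 6]
--     notes = ["C", "C#/Db", "D", "D#/Eb", "E", "F", "F#/Gb", "G", "G#/Ab", "A", "A#/Bb", "B"]
--     s=[]
--     if not (st in strings) or (fr>24):
--         return "Invalid input"
--     for i in st_open:
--         s.append(notes.index(i))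
--     return (notes[(s[st-1]+fr)%12])
-- ===== SOURCE B (Python) =====
-- LETTERS = "CDEFGAB"
-- SEMIS = [0, 2, 4, 5, 7, 9, 11]  # semitone of each natural letter
--
-- def string_fret(st, fr):
--     if st < 1 or st > 6 or fr > 24:
--         return "Invalid input"
--     open_letter = "EBGDAE"[st - 1]
--     k = (SEMIS[LETTERS.index(open_letter)] + fr) % 12
--     if k in SEMIS:
--         return LETTERS[SEMIS.index(k)]
--     j = SEMIS.index(k - 1)
--     return LETTERS[j] + "#/" + LETTERS[j + 1] + "b"
-- ===== Notes on version B (the rewrite author's own statement) =====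
-- stated objective: alternative
-- what changed: B drops A's 12-entry note table and its per-call loop that rebuilds open-string offsets via notes.index over 'EBGDAE'; instead it computes the semitone arithmetically from the 7 natural letters (CDEFGAB with semitone positions 0,2,4,5,7,9,11) and CONSTRUCTS the note name, concatenating '#/','b' for accidentals, rather than looking it up.
import Mathlib
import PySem

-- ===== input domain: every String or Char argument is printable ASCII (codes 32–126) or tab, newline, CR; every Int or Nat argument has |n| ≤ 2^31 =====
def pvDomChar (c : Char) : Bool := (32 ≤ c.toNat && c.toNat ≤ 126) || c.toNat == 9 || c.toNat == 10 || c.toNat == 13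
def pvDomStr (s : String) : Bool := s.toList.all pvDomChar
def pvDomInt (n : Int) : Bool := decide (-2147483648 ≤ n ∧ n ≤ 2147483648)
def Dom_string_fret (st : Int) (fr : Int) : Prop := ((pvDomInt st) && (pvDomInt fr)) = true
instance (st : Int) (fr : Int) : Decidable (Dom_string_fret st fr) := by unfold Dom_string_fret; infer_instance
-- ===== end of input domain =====

-- B builds the note NAME from natural-letter semitone arithmetic instead of A's lookup in a
-- 12-entry note table filled by a per-call notes.index loop; same return value everywhere.

-- ===== PORT A =====
def notesA : List String :=
  ["C", "C#/Db", "D", "D#/Eb", "E", "F", "F#/Gb", "G", "G#/Ab", "A", "A#/Bb", "B"]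

def string_fret (st : Int) (fr : Int) : String :=
  let stOpen := "EBGDAE"
  let strings : List Int := [1, 2, 3, 4, 5, 6]
  let notes := notesA
  if ¬ (st ∈ strings) ∨ fr > 24 then "Invalid input"
  else
    -- for i in st_open: s.append(notes.index(i)); every letter occurs, so index? is some
    let s : List Int := stOpen.toList.foldl
      (fun acc c => acc ++ [(((PySem.List.index? notes (String.ofList [c])).getD 0 : Nat) : Int)]) []
    -- notes[(s[st-1]+fr)%12]; st ∈ 1..6 so s[st-1] is in range and so is the %12 index
    ((PySem.List.pyGet? s (st - 1)).bind
      (fun off => PySem.List.pyGet? notes (PySem.Int.mod (off + fr) 12))).getD ""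

-- ===== PORT B =====
def lettersB : List Char := "CDEFGAB".toList
def semisB : List Int := [0, 2, 4, 5, 7, 9, 11]   -- semitone of each natural letter

def string_fret_alt (st : Int) (fr : Int) : String :=
  if st < 1 ∨ st > 6 ∨ fr > 24 then "Invalid input"
  else
    let ol : Char := (PySem.List.pyGet? "EBGDAE".toList (st - 1)).getD ' '
    -- LETTERS.index(open_letter): always found, so index? is some
    let base : Int :=
      (PySem.List.pyGet? semisB (((PySem.List.index? lettersB ol).getD 0 : Nat) : Int)).getD 0
    let k := PySem.Int.mod (base + fr) 12
    if k ∈ semisB then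
      String.ofList
        [(PySem.List.pyGet? lettersB (((PySem.List.index? semisB k).getD 0 : Nat) : Int)).getD ' ']
    else
      let j : Int := (((PySem.List.index? semisB (k - 1)).getD 0 : Nat) : Int)
      String.ofList [(PySem.List.pyGet? lettersB j).getD ' '] ++ "#/" ++
        String.ofList [(PySem.List.pyGet? lettersB (j + 1)).getD ' '] ++ "b"

-- ===== PRECONDITION & SPEC =====
def Spec_string_fret (st : Int) (fr : Int) (out : String) : Prop := out = string_fret_alt st fr
instance (st : Int) (fr : Int) (out : String) : Decidable (Spec_string_fret st fr out) := by unfold Spec_string_fret; infer_instance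

-- ===== CLAIM (what is proved, stated in full; the proofs are below) =====
def Claim_equal_string_fret : Prop := ∀ (st : Int) (fr : Int), Dom_string_fret st fr → Spec_string_fret st fr (string_fret st fr)

-- ===== LEMMAS AND PROOFS =====

-- the note B's port constructs at semitone m (proof-only abbreviation of B's valid branch)
def noteOf (m : Int) : String :=
  if m ∈ semisB then
    String.ofList
      [(PySem.List.pyGet? lettersB (((PySem.List.index? semisB m).getD 0 : Nat) : Int)).getD ' ']
  else
    String.ofList [(PySem.List.pyGet? lettersB (((PySem.List.index? semisB (m - 1)).getD 0 : Nat) : Int)).getD ' '] ++ "#/" ++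
      String.ofList [(PySem.List.pyGet? lettersB ((((PySem.List.index? semisB (m - 1)).getD 0 : Nat) : Int) + 1)).getD ' '] ++ "b"

-- B's constructed name agrees with A's table entry at every semitone 0..11
theorem note_agree (m : Int) (h0 : 0 ≤ m) (h1 : m < 12) :
    (PySem.List.pyGet? notesA m).getD "" = noteOf m := by
  interval_cases m <;> decide

theorem string_fret_eq (st fr : Int) : string_fret st fr = string_fret_alt st fr := by
  by_cases h1 : st ∈ ([1, 2, 3, 4, 5, 6] : List Int)
  · simp only [List.mem_cons, List.not_mem_nil, or_false] at h1
    rcases h1 with rfl | rfl | rfl | rfl | rfl | rfl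
    · by_cases h2 : fr > 24
      · simp [string_fret, string_fret_alt, h2]
      · have h0 : (0:Int) ≤ PySem.Int.mod (4 + fr) 12 := PySem.Int.mod_nonneg _ (by norm_num)
        have h1 : PySem.Int.mod (4 + fr) 12 < 12 := PySem.Int.mod_lt _ (by norm_num)
        have hA : string_fret 1 fr = (PySem.List.pyGet? notesA (PySem.Int.mod (4 + fr) 12)).getD "" := by
          simp [string_fret, h2, PySem.List.pyGet?, PySem.List.pyIdx?, show (List.idxOf? "E" notesA).getD 0 = 4 from by decide, show (List.idxOf? "B" notesA).getD 0 = 11 from by decide, show (List.idxOf? "G" notesA).getD 0 = 7 from by decide, show (List.idxOf? "D" notesA).getD 0 = 2 from by decide, show (List.idxOf? "A" notesA).getD 0 = 9 from by decide]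
        have hB : noteOf (PySem.Int.mod (4 + fr) 12) = string_fret_alt 1 fr := by
          simp only [string_fret_alt]
          rw [if_neg (by push Not; exact ⟨by norm_num, by norm_num, by omega⟩)]
          rfl
        exact hA.trans ((note_agree _ h0 h1).trans hB)
    · by_cases h2 : fr > 24
      · simp [string_fret, string_fret_alt, h2]
      · have h0 : (0:Int) ≤ PySem.Int.mod (11 + fr) 12 := PySem.Int.mod_nonneg _ (by norm_num)
        have h1 : PySem.Int.mod (11 + fr) 12 < 12 := PySem.Int.mod_lt _ (by norm_num)
        have hA : string_fret 2 fr = (PySem.List.pyGet? notesA (PySem.Int.mod (11 + fr) 12)).getD "" := by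
          simp [string_fret, h2, PySem.List.pyGet?, PySem.List.pyIdx?, show (List.idxOf? "E" notesA).getD 0 = 4 from by decide, show (List.idxOf? "B" notesA).getD 0 = 11 from by decide, show (List.idxOf? "G" notesA).getD 0 = 7 from by decide, show (List.idxOf? "D" notesA).getD 0 = 2 from by decide, show (List.idxOf? "A" notesA).getD 0 = 9 from by decide]
        have hB : noteOf (PySem.Int.mod (11 + fr) 12) = string_fret_alt 2 fr := by
          simp only [string_fret_alt]
          rw [if_neg (by push Not; exact ⟨by norm_num, by norm_num, by omega⟩)]
          rfl
        exact hA.trans ((note_agree _ h0 h1).trans hB)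
    · by_cases h2 : fr > 24
      · simp [string_fret, string_fret_alt, h2]
      · have h0 : (0:Int) ≤ PySem.Int.mod (7 + fr) 12 := PySem.Int.mod_nonneg _ (by norm_num)
        have h1 : PySem.Int.mod (7 + fr) 12 < 12 := PySem.Int.mod_lt _ (by norm_num)
        have hA : string_fret 3 fr = (PySem.List.pyGet? notesA (PySem.Int.mod (7 + fr) 12)).getD "" := by
          simp [string_fret, h2, PySem.List.pyGet?, PySem.List.pyIdx?, show (List.idxOf? "E" notesA).getD 0 = 4 from by decide, show (List.idxOf? "B" notesA).getD 0 = 11 from by decide, show (List.idxOf? "G" notesA).getD 0 = 7 from by decide, show (List.idxOf? "D" notesA).getD 0 = 2 from by decide, show (List.idxOf? "A" notesA).getD 0 = 9 from by decide]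
        have hB : noteOf (PySem.Int.mod (7 + fr) 12) = string_fret_alt 3 fr := by
          simp only [string_fret_alt]
          rw [if_neg (by push Not; exact ⟨by norm_num, by norm_num, by omega⟩)]
          rfl
        exact hA.trans ((note_agree _ h0 h1).trans hB)
    · by_cases h2 : fr > 24
      · simp [string_fret, string_fret_alt, h2]
      · have h0 : (0:Int) ≤ PySem.Int.mod (2 + fr) 12 := PySem.Int.mod_nonneg _ (by norm_num)
        have h1 : PySem.Int.mod (2 + fr) 12 < 12 := PySem.Int.mod_lt _ (by norm_num)
        have hA : string_fret 4 fr = (PySem.List.pyGet? notesA (PySem.Int.mod (2 + fr) 12)).getD "" := by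
          simp [string_fret, h2, PySem.List.pyGet?, PySem.List.pyIdx?, show (List.idxOf? "E" notesA).getD 0 = 4 from by decide, show (List.idxOf? "B" notesA).getD 0 = 11 from by decide, show (List.idxOf? "G" notesA).getD 0 = 7 from by decide, show (List.idxOf? "D" notesA).getD 0 = 2 from by decide, show (List.idxOf? "A" notesA).getD 0 = 9 from by decide]
        have hB : noteOf (PySem.Int.mod (2 + fr) 12) = string_fret_alt 4 fr := by
          simp only [string_fret_alt]
          rw [if_neg (by push Not; exact ⟨by norm_num, by norm_num, by omega⟩)]
          rfl
        exact hA.trans ((note_agree _ h0 h1).trans hB)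
    · by_cases h2 : fr > 24
      · simp [string_fret, string_fret_alt, h2]
      · have h0 : (0:Int) ≤ PySem.Int.mod (9 + fr) 12 := PySem.Int.mod_nonneg _ (by norm_num)
        have h1 : PySem.Int.mod (9 + fr) 12 < 12 := PySem.Int.mod_lt _ (by norm_num)
        have hA : string_fret 5 fr = (PySem.List.pyGet? notesA (PySem.Int.mod (9 + fr) 12)).getD "" := by
          simp [string_fret, h2, PySem.List.pyGet?, PySem.List.pyIdx?, show (List.idxOf? "E" notesA).getD 0 = 4 from by decide, show (List.idxOf? "B" notesA).getD 0 = 11 from by decide, show (List.idxOf? "G" notesA).getD 0 = 7 from by decide, show (List.idxOf? "D" notesA).getD 0 = 2 from by decide, show (List.idxOf? "A" notesA).getD 0 = 9 from by decide]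
        have hB : noteOf (PySem.Int.mod (9 + fr) 12) = string_fret_alt 5 fr := by
          simp only [string_fret_alt]
          rw [if_neg (by push Not; exact ⟨by norm_num, by norm_num, by omega⟩)]
          rfl
        exact hA.trans ((note_agree _ h0 h1).trans hB)
    · by_cases h2 : fr > 24
      · simp [string_fret, string_fret_alt, h2]
      · have h0 : (0:Int) ≤ PySem.Int.mod (4 + fr) 12 := PySem.Int.mod_nonneg _ (by norm_num)
        have h1 : PySem.Int.mod (4 + fr) 12 < 12 := PySem.Int.mod_lt _ (by norm_num)
        have hA : string_fret 6 fr = (PySem.List.pyGet? notesA (PySem.Int.mod (4 + fr) 12)).getD "" := by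
          simp [string_fret, h2, PySem.List.pyGet?, PySem.List.pyIdx?, show (List.idxOf? "E" notesA).getD 0 = 4 from by decide, show (List.idxOf? "B" notesA).getD 0 = 11 from by decide, show (List.idxOf? "G" notesA).getD 0 = 7 from by decide, show (List.idxOf? "D" notesA).getD 0 = 2 from by decide, show (List.idxOf? "A" notesA).getD 0 = 9 from by decide]
        have hB : noteOf (PySem.Int.mod (4 + fr) 12) = string_fret_alt 6 fr := by
          simp only [string_fret_alt]
          rw [if_neg (by push Not; exact ⟨by norm_num, by norm_num, by omega⟩)]
          rfl
        exact hA.trans ((note_agree _ h0 h1).trans hB)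
  · have hlt : st < 1 ∨ st > 6 := by
      simp only [List.mem_cons, List.not_mem_nil, or_false, not_or] at h1
      omega
    simp only [string_fret, string_fret_alt, if_pos (Or.inl h1)]
    rw [if_pos (by rcases hlt with h | h; exacts [Or.inl h, Or.inr (Or.inl h)])]

-- ===== VERDICT (by name: the statement is the Claim_ definition above) =====
theorem string_fret_spec : Claim_equal_string_fret := by
  intro st fr _
  unfold Spec_string_fret
  exact string_fret_eq st fr
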